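-- pv_equiv track=rewrite | github.com/VitorCaversan/Useful_Scripts | encodingFixer.py | is_a_define
-- ===== SOURCE A (Python) =====
-- def is_upper_case(letter : str):
--    if 'Z' >= letter >= 'A':
--       return True
--    else:
--       return False
--
-- def is_a_define(text : str):
--    index = 0
--
--    for letter in text:
--       if (len(text) - 1) == index: break
--
--       if is_upper_case(letter) and is_upper_case(text[index+1]):
--          return True
--
--       index += 1
--
--    return False
-- ===== SOURCE B (Python) =====
-- def is_a_define(text : str):
--    # Stage 1: classify every character into a mask string ('U' = ASCII uppercase).
--    # Stage 2: substring search for the pattern 'UU' in the mask.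
--    mask = ''.join('U' if 'A' <= c <= 'Z' else '.' for c in text)
--    return 'UU' in mask
-- ===== Notes on version B (the rewrite author's own statement) =====
-- stated objective: alternative
-- what changed: Replaces the index-tracking pairwise comparison loop by a two-stage pipeline: first map the text to a classification mask string ('U' for ASCII uppercase, '.' otherwise), then search that mask for the substring 'UU'.
import Mathlib
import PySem

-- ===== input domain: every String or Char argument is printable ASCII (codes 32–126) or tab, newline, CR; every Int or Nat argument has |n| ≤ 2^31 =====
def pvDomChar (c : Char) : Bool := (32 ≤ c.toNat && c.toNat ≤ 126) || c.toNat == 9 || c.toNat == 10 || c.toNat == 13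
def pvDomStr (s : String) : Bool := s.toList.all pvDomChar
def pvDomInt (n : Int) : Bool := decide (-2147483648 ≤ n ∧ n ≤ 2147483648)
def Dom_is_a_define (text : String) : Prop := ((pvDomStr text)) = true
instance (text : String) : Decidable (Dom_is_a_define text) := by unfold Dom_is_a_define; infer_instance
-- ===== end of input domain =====

-- B replaces A's index-tracking pairwise loop by a two-stage pipeline: map the text to a
-- classification mask ('U' for ASCII uppercase, '.' otherwise), then substring-search 'UU' in it.


-- ===== PORT A =====
-- 'Z' >= letter >= 'A' on a single character is a code-point comparison
def is_upper_case (letter : Char) : Bool :=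
  if 'Z' ≥ letter ∧ letter ≥ 'A' then true else false

-- the for-loop of A: iterate over the remaining letters, tracking `index` into the full text
def is_a_define_loop (full : List Char) (rest : List Char) (index : Int) : Bool :=
  match rest with
  | [] => false
  | letter :: rs =>
    if (full.length : Int) - 1 = index then false   -- break, then fall through to `return False`
    else
      match PySem.List.pyGet? full (index + 1) with -- text[index+1]; in range whenever reached
      | none => false                               -- unreachable (IndexError in Python)
      | some nxt =>
        if is_upper_case letter && is_upper_case nxt then true
        else is_a_define_loop full rs (index + 1)

def is_a_define (text : String) : Bool :=
  is_a_define_loop text.toList text.toList 0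

-- ===== PORT B =====
-- stage 1 of Source B: the classification mask
def pvMaskChar (c : Char) : Char := if 'A' ≤ c ∧ c ≤ 'Z' then 'U' else '.'

-- stage 2 of Source B: 'UU' in mask  (PySem.Chars.isIn = Python's substring `in`)
def is_a_define_alt (text : String) : Bool :=
  PySem.Chars.isIn ['U', 'U'] (text.toList.map pvMaskChar)

-- ===== PRECONDITION & SPEC =====
def Spec_is_a_define (text : String) (out : Bool) : Prop := out = is_a_define_alt text
instance (text : String) (out : Bool) : Decidable (Spec_is_a_define text out) := by unfold Spec_is_a_define; infer_instance

-- ===== CLAIM (what is proved, stated in full; the proofs are below) =====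
def Claim_equal_is_a_define : Prop := ∀ (text : String), Dom_is_a_define text → Spec_is_a_define text (is_a_define text)

-- ===== LEMMAS AND PROOFS =====

-- A's loop equals: some adjacent pair of characters is uppercase-uppercase
lemma loop_eq_zip (rest pre : List Char) :
    is_a_define_loop (pre ++ rest) rest (pre.length : Int)
      = (rest.zip rest.tail).any
          (fun p => is_upper_case p.1 && is_upper_case p.2) := by
  induction rest generalizing pre with
  | nil => simp [is_a_define_loop]
  | cons letter rs ih =>
    cases rs with
    | nil =>
      simp [is_a_define_loop]
    | cons nxt rs' =>
      have hlen : ((pre ++ letter :: nxt :: rs').length : Int) - 1 ≠ (pre.length : Int) := by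
        simp; omega
      have hget : PySem.List.pyGet? (pre ++ letter :: nxt :: rs') ((pre.length : Int) + 1)
          = some nxt := by
        have : pre ++ letter :: nxt :: rs' = (pre ++ [letter]) ++ nxt :: rs' := by simp
        rw [this]
        have h2 : ((pre.length : Int) + 1) = (((pre ++ [letter]).length : Nat) : Int) := by
          simp
        rw [h2, PySem.List.pyGet?_append_length]
      have ih' := ih (pre ++ [letter])
      simp only [List.append_assoc, List.singleton_append, List.length_append,
        List.length_singleton, Nat.cast_add, Nat.cast_one] at ih'
      rw [is_a_define_loop, if_neg hlen, hget]
      dsimp only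
      simp only [List.tail_cons, List.zip_cons_cons, List.any_cons]
      rw [ih']
      by_cases hb : (is_upper_case letter && is_upper_case nxt) = true <;> simp [hb]

lemma maskChar_eq_U (c : Char) : pvMaskChar c = 'U' ↔ is_upper_case c = true := by
  by_cases h1 : 'A' ≤ c <;> by_cases h2 : c ≤ 'Z' <;>
    simp [pvMaskChar, is_upper_case, h1, h2, ge_iff_le]

-- the pairwise condition equals the substring search on the mask
lemma zip_eq_isIn (l : List Char) :
    (l.zip l.tail).any (fun p => is_upper_case p.1 && is_upper_case p.2)
      = PySem.Chars.isIn ['U', 'U'] (l.map pvMaskChar) := by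
  rw [Bool.eq_iff_iff, PySem.Chars.isIn_iff_infix, List.any_eq_true]
  induction l with
  | nil => simp
  | cons a t ih =>
    cases t with
    | nil =>
      simp only [List.map]
      constructor
      · rintro ⟨p, hp, _⟩; simp at hp
      · intro h
        have := h.length_le
        simp at this
    | cons b t' =>
      simp only [List.tail_cons, List.zip_cons_cons, List.mem_cons, List.map]
      rw [List.infix_cons_iff]
      constructor
      · rintro ⟨p, hp | hp, hpred⟩
        · left
          subst hp
          simp only [Bool.and_eq_true] at hpred
          rw [(maskChar_eq_U a).mpr hpred.1, (maskChar_eq_U b).mpr hpred.2]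
          exact (List.prefix_cons_inj _).mpr ((List.prefix_cons_inj _).mpr List.nil_prefix)
        · right
          exact ih.mp ⟨p, hp, hpred⟩
      · rintro (hpre | hinf)
        · rcases List.cons_prefix_cons.mp hpre with ⟨h1, hrest⟩
          rcases List.cons_prefix_cons.mp hrest with ⟨h2, _⟩
          refine ⟨(a, b), Or.inl rfl, ?_⟩
          simp only [Bool.and_eq_true]
          exact ⟨(maskChar_eq_U a).mp h1.symm, (maskChar_eq_U b).mp h2.symm⟩
        · rcases ih.mpr hinf with ⟨p, hp, hpred⟩
          exact ⟨p, Or.inr hp, hpred⟩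

-- ===== VERDICT (by name: the statement is the Claim_ definition above) =====
theorem is_a_define_spec : Claim_equal_is_a_define := by
  intro text _
  unfold Spec_is_a_define is_a_define is_a_define_alt
  rw [← zip_eq_isIn]
  simpa using loop_eq_zip text.toList []
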